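-- pv_equiv track=rewrite | github.com/kisstaiyang/DataEncryption | RSA--理解版.py | getdict_EandD
-- ===== SOURCE A (Python) =====
-- import math
--
-- def getNandL(p, q):
--     N = p * q
--     L = (p - 1) * (q - 1)
--     return N, L
--
-- def getE(p, q):
--     N, L = getNandL(p, q)
--     listOfE = []
--     for i in range(2, L):
--         if math.gcd(i, L) == 1:
--             listOfE.append(i)
--     return listOfE
--
-- def getdict_EandD(p, q):
--     N, L = getNandL(p, q)
--     listOfE = getE(p, q)
--     dict_EandD = {}
--     for e in listOfE:
--         for d in range(2, L):
--             # 构建字典并去重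
--             if (e * d) % L == 1 and e != d:
--                 dict_EandD[e] = d
--     return dict_EandD
-- ===== SOURCE B (Python) =====
-- import math
--
-- def getdict_EandD(p, q):
--     L = (p - 1) * (q - 1)
--     dict_EandD = {}
--     for e in range(2, L):
--         if math.gcd(e, L) == 1:
--             d = pow(e, -1, L)  # modular inverse via extended Euclid, O(log L)
--             if d != e:
--                 dict_EandD[e] = d
--     return dict_EandD
-- ===== Notes on version B (the rewrite author's own statement) =====
-- stated objective: faster
-- what changed: B computes each unit's modular inverse directly with pow(e,-1,L) (extended Euclid) in a single pass over range(2,L), instead of A's separate coprime-list pass followed by a full inner scan over all d in range(2,L) for every e.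
import Mathlib
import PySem

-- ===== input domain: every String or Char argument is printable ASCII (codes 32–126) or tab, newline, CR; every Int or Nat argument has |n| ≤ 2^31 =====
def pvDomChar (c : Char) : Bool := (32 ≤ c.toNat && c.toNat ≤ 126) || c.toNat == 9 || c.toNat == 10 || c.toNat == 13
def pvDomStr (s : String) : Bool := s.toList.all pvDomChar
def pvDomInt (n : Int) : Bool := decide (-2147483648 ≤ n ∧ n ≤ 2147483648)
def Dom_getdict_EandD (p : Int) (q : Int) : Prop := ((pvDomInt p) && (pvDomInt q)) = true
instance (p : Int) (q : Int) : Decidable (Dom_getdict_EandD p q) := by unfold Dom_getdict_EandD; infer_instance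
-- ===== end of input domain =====

-- B replaces A's inner O(L) scan for the modular inverse by a direct extended-Euclid
-- inverse (Python pow(e,-1,L)) inside a single pass over range(2,L): asymptotically faster.

-- ===== PORT A =====
-- getNandL and getE inlined as in A: N is computed but unused by the result.
def getdict_EandD (p : Int) (q : Int) : List (Int × Int) :=
  let L : Int := (p - 1) * (q - 1)
  let listOfE : List Int :=
    (PySem.List.pyRange 2 L 1).foldl
      (fun acc i => if Int.gcd i L = 1 then acc ++ [i] else acc) []
  (listOfE.foldl
    (fun dict e =>
      (PySem.List.pyRange 2 L 1).foldl
        (fun dict d =>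
          if PySem.Int.mod (e * d) L = 1 ∧ e ≠ d then dict.insert e d else dict)
        dict)
    PySem.Dict.empty).items

-- ===== PORT B =====
-- pow(e, -1, L): the modular inverse via extended Euclid (Mathlib's Int.gcdA), reduced into [0, L).
def pyInvMod (e : Int) (L : Int) : Int := PySem.Int.mod (Int.gcdA e L) L

def getdict_EandD_alt (p : Int) (q : Int) : List (Int × Int) :=
  let L : Int := (p - 1) * (q - 1)
  ((PySem.List.pyRange 2 L 1).foldl
    (fun dict e =>
      if Int.gcd e L = 1 then
        let d := pyInvMod e L
        if d ≠ e then dict.insert e d else dict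
      else dict)
    PySem.Dict.empty).items

-- ===== PRECONDITION & SPEC =====
def Spec_getdict_EandD (p : Int) (q : Int) (out : List (Int × Int)) : Prop := out = getdict_EandD_alt p q
instance (p : Int) (q : Int) (out : List (Int × Int)) : Decidable (Spec_getdict_EandD p q out) := by unfold Spec_getdict_EandD; infer_instance

-- ===== CLAIM (what is proved, stated in full; the proofs are below) =====
def Claim_equal_getdict_EandD : Prop := ∀ (p : Int) (q : Int), Dom_getdict_EandD p q → Spec_getdict_EandD p q (getdict_EandD p q)

-- ===== LEMMAS AND PROOFS =====

-- A fold whose body never changes the accumulator on the list's members is the identity.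
lemma foldl_id {α β : Type} (l : List β) (f : α → β → α) (D : α)
    (h : ∀ acc d, d ∈ l → f acc d = acc) : l.foldl f D = D := by
  induction l generalizing D with
  | nil => rfl
  | cons x xs ih =>
      simp only [List.foldl_cons]
      rw [h D x (by simp), ih]
      intro acc d hd; exact h acc d (by simp [hd])

-- pyInvMod really is an inverse: e * pyInvMod e L ≡ 1 (mod L).
lemma pyInvMod_mul (e L : Int) (hL : 1 < L) (hg : Int.gcd e L = 1) :
    (e * pyInvMod e L) % L = 1 := by
  have hL0 : 0 < L := by omega
  unfold pyInvMod
  rw [PySem.Int.mod_eq_emod_of_pos hL0]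
  have hbez : (1 : Int) = e * Int.gcdA e L + L * Int.gcdB e L := by
    have := Int.gcd_eq_gcd_ab e L
    rw [hg] at this; exact_mod_cast this
  have h1 : (e * (Int.gcdA e L % L)) % L = (e * Int.gcdA e L) % L := by
    conv_rhs => rw [Int.mul_emod]
    rw [Int.mul_emod, Int.emod_emod_of_dvd _ dvd_rfl]
  rw [h1]
  have h2 : e * Int.gcdA e L = 1 + L * (-Int.gcdB e L) := by linarith
  rw [h2, Int.add_mul_emod_self_left, Int.emod_eq_of_lt (by omega) hL]

-- Uniqueness of the inverse in [0, L).
lemma pv_inv_unique (e L d1 d2 : Int) (h1 : 0 ≤ d1) (h1' : d1 < L) (h2 : 0 ≤ d2) (h2' : d2 < L)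
    (hm1 : (e * d1) % L = 1) (hm2 : (e * d2) % L = 1) : d1 = d2 := by
  have hL0 : 0 < L := by omega
  have k1 : (d1 * (e * d2)) % L = d1 := by
    rw [Int.mul_emod, hm2, mul_one, Int.emod_emod_of_dvd _ dvd_rfl,
        Int.emod_eq_of_lt h1 h1']
  have k2 : (d2 * (e * d1)) % L = d2 := by
    rw [Int.mul_emod, hm1, mul_one, Int.emod_emod_of_dvd _ dvd_rfl,
        Int.emod_eq_of_lt h2 h2']
  have : d1 * (e * d2) = d2 * (e * d1) := by ring
  rw [this, k2] at k1
  exact k1.symm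

-- pyInvMod lies in [2, L) for a unit e with 2 ≤ e < L.
lemma pyInvMod_bounds (e L : Int) (he2 : 2 ≤ e) (heL : e < L) (hg : Int.gcd e L = 1) :
    2 ≤ pyInvMod e L ∧ pyInvMod e L < L := by
  have hL : 1 < L := by omega
  have hL0 : 0 < L := by omega
  have hlo : 0 ≤ pyInvMod e L := by
    unfold pyInvMod; exact PySem.Int.mod_nonneg _ hL0
  have hhi : pyInvMod e L < L := by
    unfold pyInvMod; exact PySem.Int.mod_lt _ hL0
  have hmul := pyInvMod_mul e L hL hg
  have h0 : pyInvMod e L ≠ 0 := by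
    intro h; rw [h, mul_zero] at hmul; simp at hmul
  have h1 : pyInvMod e L ≠ 1 := by
    intro h; rw [h, mul_one, Int.emod_eq_of_lt (by omega) heL] at hmul; omega
  exact ⟨by omega, hhi⟩

-- A's inner scan over range(2, L) is exactly one conditional insert of the inverse.
lemma inner_fold (e L : Int) (he2 : 2 ≤ e) (heL : e < L) (hg : Int.gcd e L = 1)
    (D : PySem.Dict Int Int) :
    (PySem.List.pyRange 2 L 1).foldl
        (fun dict d =>
          if PySem.Int.mod (e * d) L = 1 ∧ e ≠ d then dict.insert e d else dict) D
      = if pyInvMod e L ≠ e then D.insert e (pyInvMod e L) else D := by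
  have hL0 : (0 : Int) < L := by omega
  have hL1 : (1 : Int) < L := by omega
  set d0 := pyInvMod e L with hd0
  have hmul := pyInvMod_mul e L hL1 hg
  have hb := pyInvMod_bounds e L he2 heL hg
  -- any member of range(2,L) satisfying the test equals d0
  have huniq : ∀ d : Int, 2 ≤ d → d < L → PySem.Int.mod (e * d) L = 1 → d = d0 := by
    intro d hd2 hdL hm
    rw [PySem.Int.mod_eq_emod_of_pos hL0] at hm
    exact pv_inv_unique e L d d0 (by omega) hdL (by omega) hb.2 hm hmul
  by_cases hne : d0 ≠ e
  · rw [if_pos hne]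
    have hmem : d0 ∈ PySem.List.pyRange 2 L 1 := by
      rw [PySem.List.mem_pyRange_one]; exact ⟨hb.1, hb.2⟩
    obtain ⟨s, t, hst⟩ := List.append_of_mem hmem
    have hnd : (PySem.List.pyRange 2 L 1).Nodup := PySem.List.nodup_pyRange_one 2 L
    rw [hst] at hnd
    have hd0s : d0 ∉ s := by
      have := List.disjoint_of_nodup_append hnd
      intro h; exact this h (by simp)
    have hd0t : d0 ∉ t := ((List.nodup_cons).1 hnd.of_append_right).1
    rw [hst, List.foldl_append, List.foldl_cons]
    have hskip : ∀ (x : Int) (l : List Int), d0 ∉ l → l ⊆ PySem.List.pyRange 2 L 1 →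
        ∀ (D' : PySem.Dict Int Int), l.foldl
          (fun dict d => if PySem.Int.mod (e * d) L = 1 ∧ e ≠ d then dict.insert e d else dict) D' = D' := by
      intro x l hni hsub D'
      apply foldl_id
      intro acc d hd
      rw [if_neg]
      rintro ⟨hm, -⟩
      have hdr := hsub hd
      rw [PySem.List.mem_pyRange_one] at hdr
      exact hni (huniq d hdr.1 hdr.2 hm ▸ hd)
    rw [hskip 0 s hd0s (by rw [hst]; exact fun a h => by simp [h]) D]
    rw [if_pos ⟨by rw [PySem.Int.mod_eq_emod_of_pos hL0]; exact hmul, fun h => hne h.symm⟩]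
    exact hskip 0 t hd0t (by rw [hst]; exact fun a h => by simp [h]) _
  · rw [if_neg hne]
    replace hne : d0 = e := not_not.mp hne
    apply foldl_id
    intro acc d hd
    rw [PySem.List.mem_pyRange_one] at hd
    rw [if_neg]
    rintro ⟨hm, hed⟩
    exact hed (hne ▸ (huniq d hd.1 hd.2 hm).symm)

-- A's outer loop over a duplicate-free list of units, starting from a dict containing none of them.
lemma outer_fold (L : Int) (es : List Int) (D : PySem.Dict Int Int)
    (hmem : ∀ e ∈ es, 2 ≤ e ∧ e < L ∧ Int.gcd e L = 1)
    (hnd : es.Nodup)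
    (hdisj : ∀ e ∈ es, D.contains e = false) :
    (es.foldl
      (fun dict e =>
        (PySem.List.pyRange 2 L 1).foldl
          (fun dict d =>
            if PySem.Int.mod (e * d) L = 1 ∧ e ≠ d then dict.insert e d else dict)
          dict) D).items
    = D.items ++ es.filterMap
        (fun e => if pyInvMod e L ≠ e then some (e, pyInvMod e L) else none) := by
  induction es generalizing D with
  | nil => simp
  | cons e es ih =>
      obtain ⟨he2, heL, hg⟩ := hmem e (by simp)
      simp only [List.foldl_cons, List.filterMap_cons]
      rw [inner_fold e L he2 heL hg D]
      by_cases hne : pyInvMod e L ≠ e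
      · rw [if_pos hne, if_pos hne]
        rw [ih (D.insert e (pyInvMod e L))
              (fun e' he' => hmem e' (by simp [he']))
              hnd.of_cons
              (by intro e' he'
                  rw [PySem.Dict.contains_insert]
                  have hne' : e' ≠ e := fun h => (List.nodup_cons.1 hnd).1 (h ▸ he')
                  simp [hne', hdisj e' (by simp [he'])])]
        rw [PySem.Dict.items_insert_of_not_contains _ _ (hdisj e (by simp))]
        simp
      · rw [if_neg hne, if_neg hne]
        exact ih D (fun e' he' => hmem e' (by simp [he'])) hnd.of_cons
          (fun e' he' => hdisj e' (by simp [he']))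

-- B's single loop, same shape.
lemma alt_fold (L : Int) (es : List Int) (D : PySem.Dict Int Int)
    (hnd : es.Nodup)
    (hdisj : ∀ e ∈ es, D.contains e = false) :
    (es.foldl
      (fun dict e =>
        if Int.gcd e L = 1 then
          let d := pyInvMod e L
          if d ≠ e then dict.insert e d else dict
        else dict) D).items
    = D.items ++ es.filterMap
        (fun e => if Int.gcd e L = 1 then
            (if pyInvMod e L ≠ e then some (e, pyInvMod e L) else none) else none) := by
  induction es generalizing D with
  | nil => simp
  | cons e es ih =>
      simp only [List.foldl_cons, List.filterMap_cons]
      by_cases hg : Int.gcd e L = 1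
      · rw [if_pos hg, if_pos hg]
        by_cases hne : pyInvMod e L ≠ e
        · rw [if_pos hne, if_pos hne]
          rw [ih (D.insert e (pyInvMod e L)) hnd.of_cons
                (by intro e' he'
                    rw [PySem.Dict.contains_insert]
                    have hne' : e' ≠ e := fun h => (List.nodup_cons.1 hnd).1 (h ▸ he')
                    simp [hne', hdisj e' (by simp [he'])])]
          rw [PySem.Dict.items_insert_of_not_contains _ _ (hdisj e (by simp))]
          simp
        · rw [if_neg hne, if_neg hne]
          exact ih D hnd.of_cons (fun e' he' => hdisj e' (by simp [he']))
      · rw [if_neg hg, if_neg hg]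
        exact ih D hnd.of_cons (fun e' he' => hdisj e' (by simp [he']))

-- The two programs agree for every modulus L.
lemma ports_eq (L : Int) :
    ((((PySem.List.pyRange 2 L 1).foldl
        (fun acc i => if Int.gcd i L = 1 then acc ++ [i] else acc) []).foldl
      (fun dict e =>
        (PySem.List.pyRange 2 L 1).foldl
          (fun dict d =>
            if PySem.Int.mod (e * d) L = 1 ∧ e ≠ d then dict.insert e d else dict)
          dict)
      PySem.Dict.empty).items)
    = ((PySem.List.pyRange 2 L 1).foldl
        (fun dict e =>
          if Int.gcd e L = 1 then
            let d := pyInvMod e L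
            if d ≠ e then dict.insert e d else dict
          else dict)
        PySem.Dict.empty).items := by
  rw [PySem.List.foldl_append_ite_eq_filter]
  rw [outer_fold L _ PySem.Dict.empty
        (by intro e he
            simp only [List.nil_append, List.mem_filter, PySem.List.mem_pyRange_one,
              decide_eq_true_eq] at he
            exact ⟨he.1.1, he.1.2, he.2⟩)
        (by simp only [List.nil_append]
            exact (PySem.List.nodup_pyRange_one 2 L).filter _)
        (by intro e _; exact PySem.Dict.contains_empty e)]
  rw [alt_fold L _ PySem.Dict.empty (PySem.List.nodup_pyRange_one 2 L)
        (by intro e _; exact PySem.Dict.contains_empty e)]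
  simp only [List.nil_append]
  rw [List.filterMap_filter]
  simp

-- ===== VERDICT (by name: the statement is the Claim_ definition above) =====
theorem getdict_EandD_spec : Claim_equal_getdict_EandD := by
  intro p q _
  unfold Spec_getdict_EandD getdict_EandD getdict_EandD_alt
  exact ports_eq ((p - 1) * (q - 1))
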